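-- pv_equiv track=rewrite | github.com/GuideboardLabs/foxforge | SourceCode/agents_research/deep_researcher.py | _is_failure_text
-- ===== SOURCE A (Python) =====
-- def _is_failure_text(text: str) -> bool:
--     low = str(text or "").strip().lower()
--     if not low:
--         return True
--     markers = [
--         "model call failed",
--         "fallback failed",
--         "ollama chat failed",
--         "no model configured",
--         "could not connect to ollama",
--         "ollama http 5",
--         "traceback",
--     ]
--     return any(token in low for token in markers)
-- ===== SOURCE B (Python) =====
-- # B: single left-to-right scan over the text; at each position test whether any
-- # marker starts there, instead of seven independent full substring searches.
-- _MARKERS = (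
--     "model call failed",
--     "fallback failed",
--     "ollama chat failed",
--     "no model configured",
--     "could not connect to ollama",
--     "ollama http 5",
--     "traceback",
-- )
--
--
-- def _is_failure_text(text: str) -> bool:
--     low = str(text or "").strip().lower()
--     if not low:
--         return True
--     for i in range(len(low)):
--         for m in _MARKERS:
--             if low.startswith(m, i):
--                 return True
--     return False
-- ===== Notes on version B (the rewrite author's own statement) =====
-- stated objective: alternative
-- what changed: A performs seven independent whole-text substring-containment searches, one per marker; B makes a single left-to-right scan over the positions of the normalized text and at each position tests whether any marker starts there with an offset startswith, a position-outer instead of marker-outer traversal.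
import Mathlib
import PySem

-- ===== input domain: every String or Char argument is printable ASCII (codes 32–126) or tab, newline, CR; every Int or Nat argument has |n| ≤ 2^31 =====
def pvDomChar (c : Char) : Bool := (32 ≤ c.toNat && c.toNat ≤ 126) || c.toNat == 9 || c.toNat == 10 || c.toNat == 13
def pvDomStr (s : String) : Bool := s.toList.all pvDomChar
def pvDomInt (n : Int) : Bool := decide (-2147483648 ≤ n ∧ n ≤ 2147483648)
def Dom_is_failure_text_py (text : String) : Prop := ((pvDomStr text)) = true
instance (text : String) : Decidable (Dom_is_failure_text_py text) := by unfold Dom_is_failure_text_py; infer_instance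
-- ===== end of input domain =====

-- B replaces A's seven whole-text 'token in low' searches by one left-to-right scan
-- over positions, testing at each position whether any marker starts there.

-- ===== PORT A =====
def is_failure_text_py (text : String) : Bool :=
  -- low = str(text or "").strip().lower()  ('text or ""' is the identity on str arguments)
  let low := PySem.Str.lower (PySem.Str.strip text)
  if PySem.Str.len low = 0 then true
  else
    let markers : List String :=
      ["model call failed", "fallback failed", "ollama chat failed",
       "no model configured", "could not connect to ollama", "ollama http 5",
       "traceback"]
    markers.any (fun token => PySem.Str.isIn token low)

-- ===== PORT B =====
def pvMarkersB : List (List Char) :=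
  ["model call failed".toList, "fallback failed".toList, "ollama chat failed".toList,
   "no model configured".toList, "could not connect to ollama".toList,
   "ollama http 5".toList, "traceback".toList]

def is_failure_text_py_alt (text : String) : Bool :=
  let low := PySem.Chars.lower (PySem.Chars.strip text.toList)
  if low.length = 0 then true
  else
    -- for i in range(len(low)): for m in _MARKERS: if low.startswith(m, i): return True
    (List.range low.length).any (fun i =>
      pvMarkersB.any (fun m => PySem.Chars.startswith (low.drop i) m))

-- ===== PRECONDITION & SPEC =====
def Spec_is_failure_text_py (text : String) (out : Bool) : Prop := out = is_failure_text_py_alt text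
instance (text : String) (out : Bool) : Decidable (Spec_is_failure_text_py text out) := by unfold Spec_is_failure_text_py; infer_instance

-- ===== CLAIM (what is proved, stated in full; the proofs are below) =====
def Claim_equal_is_failure_text_py : Prop := ∀ (text : String), Dom_is_failure_text_py text → Spec_is_failure_text_py text (is_failure_text_py text)

-- ===== LEMMAS AND PROOFS =====

-- a nonempty pattern occurs in s iff it starts at some position i < s.length
theorem isIn_eq_any_startswith (s sub : List Char) (hsub : sub ≠ []) :
    PySem.Chars.isIn sub s
      = (List.range s.length).any (fun i => PySem.Chars.startswith (s.drop i) sub) := by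
  apply Bool.eq_iff_iff.mpr
  rw [← PySem.Chars.exists_prefix_drop_iff_isIn]
  simp only [List.any_eq_true, List.mem_range, PySem.Chars.startswith_iff]
  constructor
  · rintro ⟨j, hj⟩
    refine ⟨j, ?_, hj⟩
    by_contra h
    rw [List.drop_eq_nil_of_le (Nat.le_of_not_lt h)] at hj
    exact hsub (List.prefix_nil.mp hj)
  · rintro ⟨i, _, hi⟩
    exact ⟨i, hi⟩

theorem is_failure_text_py_eq (text : String) :
    is_failure_text_py text = is_failure_text_py_alt text := by
  unfold is_failure_text_py is_failure_text_py_alt pvMarkersB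
  simp only [PySem.Str.len_eq, PySem.Str.toList_lower, PySem.Str.toList_strip,
    PySem.Str.isIn_eq, Nat.cast_eq_zero]
  set low := PySem.Chars.lower (PySem.Chars.strip text.toList) with hlow
  by_cases h : low.length = 0
  · simp [h]
  · simp only [h, if_false]
    -- rewrite each of A's seven isIn tests as a position scan, then swap the anys
    apply Bool.eq_iff_iff.mpr
    simp only [List.any_eq_true, List.mem_range, List.mem_cons, List.not_mem_nil,
      or_false]
    constructor
    · rintro ⟨tok, htok, hin⟩
      have hne : tok.toList ≠ [] := by
        rcases htok with h|h|h|h|h|h|h <;> subst h <;> decide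
      rw [isIn_eq_any_startswith low tok.toList hne] at hin
      simp only [List.any_eq_true, List.mem_range] at hin
      obtain ⟨i, hi, hsw⟩ := hin
      exact ⟨i, hi, tok.toList, by rcases htok with h|h|h|h|h|h|h <;> subst h <;> simp, hsw⟩
    · rintro ⟨i, hi, m, hm, hsw⟩
      -- each m in pvMarkersB is tok.toList for some tok in A's list
      have : ∃ tok : String, (tok = "model call failed" ∨ tok = "fallback failed" ∨
          tok = "ollama chat failed" ∨ tok = "no model configured" ∨
          tok = "could not connect to ollama" ∨ tok = "ollama http 5" ∨
          tok = "traceback") ∧ tok.toList = m := by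
        rcases hm with h|h|h|h|h|h|h <;> subst h
        · exact ⟨"model call failed", by simp, rfl⟩
        · exact ⟨"fallback failed", by simp, rfl⟩
        · exact ⟨"ollama chat failed", by simp, rfl⟩
        · exact ⟨"no model configured", by simp, rfl⟩
        · exact ⟨"could not connect to ollama", by simp, rfl⟩
        · exact ⟨"ollama http 5", by simp, rfl⟩
        · exact ⟨"traceback", by simp, rfl⟩
      obtain ⟨tok, htok, hts⟩ := this
      have hne : tok.toList ≠ [] := by
        rcases htok with h|h|h|h|h|h|h <;> subst h <;> decide
      refine ⟨tok, htok, ?_⟩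
      rw [isIn_eq_any_startswith low tok.toList hne]
      simp only [List.any_eq_true, List.mem_range]
      exact ⟨i, hi, hts ▸ hsw⟩

-- ===== VERDICT (by name: the statement is the Claim_ definition above) =====
theorem is_failure_text_py_spec : Claim_equal_is_failure_text_py := by
  intro text _
  exact is_failure_text_py_eq text
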